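-- pv_equiv track=rewrite | github.com/Arsen1302/Code-copy-detector | TestData/solutions/problem_1561_3.py | solution_1561_3
-- ===== SOURCE A (Python) =====
-- def solution_1561_3(num: str) -> str:
--     num = "0"+num+"0"
--     i=0
--     l=len(num)
--     max_=-1
--     for i in range(1,l-1):
--         if num[i]==num[i-1]==num[i+1]:
--             max_=max(int(num[i]),max_)
--     if max_==-1:
--         return ""
--     return str(max_)*3
-- ===== SOURCE B (Python) =====
-- def solution_1561_3(num: str) -> str:
--     s = "0" + num + "0"
--     for d in "9876543210":
--         if d * 3 in s:
--             return d * 3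
--     return ""
-- ===== Notes on version B (the rewrite author's own statement) =====
-- stated objective: idiomatic
-- what changed: Instead of scanning every index of the padded string for a triple and folding a running max of int(num[i]), B counts down the ten digits from 9 to 0 and returns the triple of the first digit that occurs three times in a row as a substring of the padded string (empty string if none).
-- outside the precondition, e.g. on solution_1561_3('ddd'): A raises ValueError, B returns ''
import Mathlib
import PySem

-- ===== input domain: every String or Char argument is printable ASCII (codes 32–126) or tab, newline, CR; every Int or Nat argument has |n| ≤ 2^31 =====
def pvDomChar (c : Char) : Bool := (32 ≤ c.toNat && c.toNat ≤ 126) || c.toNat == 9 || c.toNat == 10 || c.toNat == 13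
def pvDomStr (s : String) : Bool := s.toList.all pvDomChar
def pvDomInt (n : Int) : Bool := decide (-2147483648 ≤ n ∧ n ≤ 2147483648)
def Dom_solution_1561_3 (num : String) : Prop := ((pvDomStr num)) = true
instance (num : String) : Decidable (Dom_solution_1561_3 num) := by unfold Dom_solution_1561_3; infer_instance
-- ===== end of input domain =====

-- B replaces A's index scan + running max with a countdown over the digits '9'..'0' that returns
-- the first digit whose triple is a substring of the padded string (idiomatic, same cost).

-- ===== PORT A =====
-- loop state: some max_ normally; none once int() has raised ValueError
def solution_1561_3 (num : String) : String :=
  let p : List Char := '0' :: num.toList ++ ['0']   -- num = "0"+num+"0"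
  let l : Int := PySem.List.len p
  let maxOpt : Option Int :=
    (PySem.List.pyRange 1 (l - 1) 1).foldl
      (fun acc i =>
        if PySem.List.pyGetD p i ' ' = PySem.List.pyGetD p (i - 1) ' ' ∧
           PySem.List.pyGetD p (i - 1) ' ' = PySem.List.pyGetD p (i + 1) ' '
        then acc.bind (fun m => (PySem.Int.ofChars? [PySem.List.pyGetD p i ' ']).map (fun v => max v m))
        else acc)
      (some (-1))
  match maxOpt with
  | none => ""   -- ValueError: excluded by Pre_solution_1561_3
  | some m => if m = -1 then "" else
      String.mk (PySem.Int.toChars m ++ PySem.Int.toChars m ++ PySem.Int.toChars m)  -- str(max_)*3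

-- ===== PORT B =====
-- for d in "9876543210": if d*3 in s: return d*3  /  return ""
def bCountdown : List Char → List Char → String
  | [], _ => ""
  | d :: ds, s => if PySem.Chars.isIn [d, d, d] s then String.mk [d, d, d] else bCountdown ds s

def solution_1561_3_alt (num : String) : String :=
  let s : List Char := '0' :: num.toList ++ ['0']   -- s = "0" + num + "0"
  bCountdown ['9', '8', '7', '6', '5', '4', '3', '2', '1', '0'] s

-- ===== PRECONDITION & SPEC =====
-- Pre_ excludes exactly the inputs on which A raises ValueError: those whose padded string has
-- three consecutive equal NON-digit characters (A then calls int() on a non-digit character).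
def Pre_solution_1561_3 (num : String) : Prop :=
  ∀ i < ('0' :: num.toList ++ ['0']).length,
    (('0' :: num.toList ++ ['0']).getD i ' ' = ('0' :: num.toList ++ ['0']).getD (i + 1) ' ' ∧
     ('0' :: num.toList ++ ['0']).getD (i + 1) ' ' = ('0' :: num.toList ++ ['0']).getD (i + 2) ' ' ∧
     i + 2 < ('0' :: num.toList ++ ['0']).length) →
    (('0' :: num.toList ++ ['0']).getD i ' ').isDigit = true
instance (num : String) : Decidable (Pre_solution_1561_3 num) := by unfold Pre_solution_1561_3; infer_instance

def pvWitness_solution_1561_3 : String := "1222"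

def Spec_solution_1561_3 (num : String) (out : String) : Prop := out = solution_1561_3_alt num
instance (num : String) (out : String) : Decidable (Spec_solution_1561_3 num out) := by unfold Spec_solution_1561_3; infer_instance

-- ===== CLAIM (what is proved, stated in full; the proofs are below) =====
def Claim_equal_solution_1561_3 : Prop := ∀ (num : String), Dom_solution_1561_3 num → Pre_solution_1561_3 num → Spec_solution_1561_3 num (solution_1561_3 num)

-- ===== LEMMAS AND PROOFS =====

-- digit value of a digit character
def dval (c : Char) : Int := (c.toNat : Int) - 48

-- proof-side structural form of A's loop (a 3-char sliding window; state still Option)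
def scanT (acc : Option Int) : List Char → Option Int
  | a :: b :: c :: rest =>
      scanT (if b = a ∧ a = c
             then acc.bind (fun m => (PySem.Int.ofChars? [b]).map (fun v => max v m))
             else acc) (b :: c :: rest)
  | _ => acc

-- pure running max, valid once every triple character is a digit
def scanV (m : Int) : List Char → Int
  | a :: b :: c :: rest => scanV (if b = a ∧ a = c then max (dval b) m else m) (b :: c :: rest)
  | _ => m

theorem scanT_short (acc : Option Int) (l : List Char) (h : l.length ≤ 2) : scanT acc l = acc := by
  match l with
  | [] => rfl
  | [a] => rfl
  | [a, b] => rfl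
  | a :: b :: c :: rest => simp at h

-- A's foldl over range(1, l-1), entered at index k+1, is the window scan of q.drop k
theorem bridge (q : List Char) : ∀ (k : Nat) (acc : Option Int),
    (PySem.List.pyRange ((k : Int) + 1) (PySem.List.len q - 1) 1).foldl
      (fun acc i =>
        if PySem.List.pyGetD q i ' ' = PySem.List.pyGetD q (i - 1) ' ' ∧
           PySem.List.pyGetD q (i - 1) ' ' = PySem.List.pyGetD q (i + 1) ' '
        then acc.bind (fun m => (PySem.Int.ofChars? [PySem.List.pyGetD q i ' ']).map (fun v => max v m))
        else acc)
      acc = scanT acc (q.drop k) := by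
  intro k
  induction hn : q.length - k using Nat.strong_induction_on generalizing k with
  | _ n ih =>
  intro acc
  by_cases hk : k + 2 < q.length
  · rw [PySem.List.pyRange_one_cons (by simp [PySem.List.len_eq]; omega)]
    rw [List.foldl_cons]
    have e1 : (k : Int) + 1 - 1 = ((k : Nat) : Int) := by omega
    have e2 : (k : Int) + 1 = (((k + 1 : Nat)) : Int) := by omega
    have e3 : (k : Int) + 1 + 1 = (((k + 2 : Nat)) : Int) := by omega
    rw [e1, e3, e2]
    have e4 : ((k + 1 : Nat) : Int) + 1 = ((k + 2 : Nat) : Int) := by omega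
    simp only [PySem.List.pyGetD_natCast]
    have hdrop : q.drop k = q[k] :: q[k+1] :: q[k+2] :: q.drop (k+3) := by
      rw [List.drop_eq_getElem_cons (by omega), List.drop_eq_getElem_cons (by omega),
          List.drop_eq_getElem_cons (by omega)]
    rw [hdrop]
    rw [scanT]
    have g0 : q.getD k ' ' = q[k] := List.getD_eq_getElem q ' ' (by omega)
    have g1 : q.getD (k+1) ' ' = q[k+1] := List.getD_eq_getElem q ' ' (by omega)
    have g2 : q.getD (k+2) ' ' = q[k+2] := List.getD_eq_getElem q ' ' (by omega)
    rw [g0, g1, g2]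
    have hdrop1 : q.drop (k+1) = q[k+1] :: q[k+2] :: q.drop (k+3) := by
      rw [List.drop_eq_getElem_cons (by omega), List.drop_eq_getElem_cons (by omega)]
    have := ih (q.length - (k+1)) (by omega) (k+1) rfl
      (acc := if q[k+1] = q[k] ∧ q[k] = q[k+2]
              then acc.bind (fun m => (PySem.Int.ofChars? [q[k+1]]).map (fun v => max v m))
              else acc)
    rw [e4, hdrop1] at this
    exact this
  · rw [PySem.List.pyRange_one_eq_nil (by simp [PySem.List.len_eq]; omega)]
    rw [List.foldl_nil, scanT_short _ _ (by simp; omega)]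

theorem digit_mem (d : Char) (h : d.isDigit = true) :
    d ∈ ['0', '1', '2', '3', '4', '5', '6', '7', '8', '9'] := by
  simp [Char.isDigit] at h
  obtain ⟨h1, h2⟩ := h
  rw [UInt32.le_iff_toNat_le] at h1 h2
  simp at h1 h2
  have hn : d.toNat = 48 ∨ d.toNat = 49 ∨ d.toNat = 50 ∨ d.toNat = 51 ∨ d.toNat = 52 ∨
      d.toNat = 53 ∨ d.toNat = 54 ∨ d.toNat = 55 ∨ d.toNat = 56 ∨ d.toNat = 57 := by omega
  rcases hn with h|h|h|h|h|h|h|h|h|h <;>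
    [ (have : d = '0' := Char.ext (UInt32.toNat_inj.mp h));
      (have : d = '1' := Char.ext (UInt32.toNat_inj.mp h));
      (have : d = '2' := Char.ext (UInt32.toNat_inj.mp h));
      (have : d = '3' := Char.ext (UInt32.toNat_inj.mp h));
      (have : d = '4' := Char.ext (UInt32.toNat_inj.mp h));
      (have : d = '5' := Char.ext (UInt32.toNat_inj.mp h));
      (have : d = '6' := Char.ext (UInt32.toNat_inj.mp h));
      (have : d = '7' := Char.ext (UInt32.toNat_inj.mp h));
      (have : d = '8' := Char.ext (UInt32.toNat_inj.mp h));
      (have : d = '9' := Char.ext (UInt32.toNat_inj.mp h))] <;>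
    simp [this]

theorem dval_ofChars (d : Char) (h : d.isDigit = true) :
    PySem.Int.ofChars? [d] = some (dval d) := by
  have := digit_mem d h
  fin_cases this <;> decide

theorem scanT_eq_scanV (l : List Char)
    (H : ∀ d, [d, d, d] <:+: l → d.isDigit = true) :
    ∀ m : Int, scanT (some m) l = some (scanV m l) := by
  induction l with
  | nil => intro m; rfl
  | cons a t ih =>
    intro m
    match t with
    | [] => rfl
    | [b] => rfl
    | b :: c :: rest =>
      have Ht : ∀ d, [d, d, d] <:+: (b :: c :: rest) → d.isDigit = true :=
        fun d hd => H d (hd.trans (List.suffix_cons a _).isInfix)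
      by_cases hc : b = a ∧ a = c
      · have hbd : b.isDigit = true := by
          apply H b
          obtain ⟨h1, h2⟩ := hc
          subst h1; subst h2
          exact ⟨[], rest, rfl⟩
        rw [scanT, scanV, if_pos hc, if_pos hc, dval_ofChars b hbd]
        simpa using ih Ht (max (dval b) m)
      · rw [scanT, scanV, if_neg hc, if_neg hc]
        exact ih Ht m

theorem le_scanV (l : List Char) (m : Int) : m ≤ scanV m l := by
  induction l generalizing m with
  | nil => exact le_refl m
  | cons a t ih =>
    match t with
    | [] => exact le_refl m
    | [b] => exact le_refl m
    | b :: c :: rest =>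
      rw [scanV]
      split_ifs with hc
      · calc m ≤ max (dval b) m := le_max_right _ _
          _ ≤ _ := ih _
      · exact ih m

theorem triple_le_scanV (l : List Char) (d : Char) (m : Int)
    (h : [d, d, d] <:+: l) : dval d ≤ scanV m l := by
  induction l generalizing m with
  | nil => simp at h
  | cons a t ih =>
    rw [List.infix_cons_iff] at h
    match t with
    | [] => exfalso; rcases h with h | h <;> · have := h.length_le; simp at this
    | [b] => exfalso; rcases h with h | h <;> · have := h.length_le; simp at this
    | b :: c :: rest =>
      rcases h with h | h
      · simp [List.cons_prefix_cons] at h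
        obtain ⟨h1, h2, h3⟩ := h
        rw [scanV, if_pos ⟨h2.symm.trans h1, h1.symm.trans h3⟩]
        calc dval d = dval b := by rw [h2]
          _ ≤ max (dval b) m := le_max_left _ _
          _ ≤ _ := le_scanV _ _
      · rw [scanV]
        split_ifs with hc
        · exact ih _ h
        · exact ih _ h

theorem scanV_cases (l : List Char) : ∀ m : Int,
    scanV m l = m ∨ ∃ d, [d, d, d] <:+: l ∧ scanV m l = dval d := by
  induction l with
  | nil => intro m; left; rfl
  | cons a t ih =>
    intro m
    match t with
    | [] => left; rfl
    | [b] => left; rfl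
    | b :: c :: rest =>
      have lift : ∀ d, [d,d,d] <:+: (b :: c :: rest) → [d,d,d] <:+: (a :: b :: c :: rest) :=
        fun d hd => hd.trans (List.suffix_cons a _).isInfix
      rw [scanV]
      split_ifs with hc
      · rcases ih (max (dval b) m) with h | ⟨d, hd, he⟩
        · rcases max_cases (dval b) m with ⟨he, -⟩ | ⟨he, -⟩
          · right; refine ⟨b, ?_, by rw [h, he]⟩
            obtain ⟨h1, h2⟩ := hc
            subst h1; subst h2
            exact ⟨[], rest, rfl⟩
          · left; rw [h, he]
        · right; exact ⟨d, lift d hd, he⟩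
      · rcases ih m with h | ⟨d, hd, he⟩
        · left; exact h
        · right; exact ⟨d, lift d hd, he⟩

theorem bCountdown_none (ds s : List Char) (h : ∀ e ∈ ds, ¬ ([e, e, e] <:+: s)) :
    bCountdown ds s = "" := by
  induction ds with
  | nil => rfl
  | cons d t ih =>
    rw [bCountdown, if_neg, ih (fun e he => h e (List.mem_cons_of_mem d he))]
    simpa [PySem.Chars.isIn_iff_infix] using h d List.mem_cons_self

theorem bCountdown_hit (as bs s : List Char) (d : Char)
    (h1 : ∀ e ∈ as, ¬ ([e, e, e] <:+: s)) (h2 : [d, d, d] <:+: s) :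
    bCountdown (as ++ d :: bs) s = String.mk [d, d, d] := by
  induction as with
  | nil =>
    rw [List.nil_append, bCountdown, if_pos (by simpa [PySem.Chars.isIn_iff_infix] using h2)]
  | cons e t ih =>
    rw [List.cons_append, bCountdown, if_neg, ih (fun x hx => h1 x (List.mem_cons_of_mem e hx))]
    simpa [PySem.Chars.isIn_iff_infix] using h1 e List.mem_cons_self

-- the positional precondition implies: every character of a triple substring is a digit
theorem pre_infix (num : String) (hPre : Pre_solution_1561_3 num) :
    ∀ d, [d, d, d] <:+: ('0' :: num.toList ++ ['0']) → d.isDigit = true := by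
  intro d hin
  obtain ⟨s, t, hst⟩ := hin
  have hlen : ('0' :: num.toList ++ ['0']).length = s.length + 3 + t.length := by
    rw [← hst]; simp; omega
  have hget : ∀ j, j < 3 → ('0' :: num.toList ++ ['0']).getD (s.length + j) ' ' = d := by
    intro j hj
    rw [← hst, List.getD_eq_getElem?_getD, List.append_assoc, List.getElem?_append_right (by omega)]
    have : s.length + j - s.length = j := by omega
    rw [this, List.getElem?_append_left (by simp; omega)]
    interval_cases j <;> rfl
  have h0 := hget 0 (by omega)
  have h1 := hget 1 (by omega)
  have h2 := hget 2 (by omega)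
  rw [Nat.add_zero] at h0
  have := hPre s.length (by omega) ⟨by rw [h0, h1], by rw [h1, h2], by omega⟩
  rwa [h0] at this

-- the countdown returns the triple of the maximal digit that occurs tripled
theorem countdown_exact (s : List Char) (d : Char)
    (hd : d ∈ ['0', '1', '2', '3', '4', '5', '6', '7', '8', '9'])
    (h2 : [d, d, d] <:+: s)
    (hmax : ∀ e, [e, e, e] <:+: s → dval e ≤ dval d) :
    bCountdown ['9', '8', '7', '6', '5', '4', '3', '2', '1', '0'] s = String.mk [d, d, d] := by
  have key : ∀ (as bs : List Char), (∀ e ∈ as, dval d < dval e) →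
      as ++ d :: bs = ['9', '8', '7', '6', '5', '4', '3', '2', '1', '0'] →
      bCountdown ['9', '8', '7', '6', '5', '4', '3', '2', '1', '0'] s = String.mk [d, d, d] := by
    intro as bs hgt heq
    rw [← heq]
    exact bCountdown_hit as bs s d
      (fun e he hin => absurd (hmax e hin) (by have := hgt e he; omega)) h2
  fin_cases hd
  · exact key ['9', '8', '7', '6', '5', '4', '3', '2', '1'] [] (by intro e he; fin_cases he <;> decide) rfl
  · exact key ['9', '8', '7', '6', '5', '4', '3', '2'] ['0'] (by intro e he; fin_cases he <;> decide) rfl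
  · exact key ['9', '8', '7', '6', '5', '4', '3'] ['1', '0'] (by intro e he; fin_cases he <;> decide) rfl
  · exact key ['9', '8', '7', '6', '5', '4'] ['2', '1', '0'] (by intro e he; fin_cases he <;> decide) rfl
  · exact key ['9', '8', '7', '6', '5'] ['3', '2', '1', '0'] (by intro e he; fin_cases he <;> decide) rfl
  · exact key ['9', '8', '7', '6'] ['4', '3', '2', '1', '0'] (by intro e he; fin_cases he <;> decide) rfl
  · exact key ['9', '8', '7'] ['5', '4', '3', '2', '1', '0'] (by intro e he; fin_cases he <;> decide) rfl
  · exact key ['9', '8'] ['6', '5', '4', '3', '2', '1', '0'] (by intro e he; fin_cases he <;> decide) rfl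
  · exact key ['9'] ['7', '6', '5', '4', '3', '2', '1', '0'] (by intro e he; fin_cases he <;> decide) rfl
  · exact key [] ['8', '7', '6', '5', '4', '3', '2', '1', '0'] (by intro e he; fin_cases he <;> decide) rfl

-- ===== VERDICT (by name: the statement is the Claim_ definition above) =====
theorem solution_1561_3_spec : Claim_equal_solution_1561_3 := by
  intro num _ hPre
  unfold Spec_solution_1561_3
  have H := pre_infix num hPre
  have hb := bridge ('0' :: num.toList ++ ['0']) 0 (some (-1))
  simp only [Nat.cast_zero, zero_add, List.drop_zero] at hb
  unfold solution_1561_3 solution_1561_3_alt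
  simp only []
  rw [hb, scanT_eq_scanV _ H]
  by_cases hr : scanV (-1) ('0' :: num.toList ++ ['0']) = -1
  · rw [hr]
    have hB : bCountdown ['9', '8', '7', '6', '5', '4', '3', '2', '1', '0']
        ('0' :: num.toList ++ ['0']) = "" := by
      apply bCountdown_none
      intro e he hin
      have := triple_le_scanV _ e (-1) hin
      rw [hr] at this
      fin_cases he <;> exact absurd this (by decide)
    rw [hB]
    rfl
  · rcases scanV_cases ('0' :: num.toList ++ ['0']) (-1) with h | ⟨d, hd, he⟩
    · exact absurd h hr
    · have hdig := H d hd
      have hmem := digit_mem d hdig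
      rw [he]
      rw [countdown_exact _ d hmem hd (fun e hin => he ▸ triple_le_scanV _ e (-1) hin)]
      have hne : dval d ≠ -1 := by fin_cases hmem <;> decide
      dsimp only
      rw [if_neg hne]
      fin_cases hmem <;> decide
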